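-- pv_equiv track=rewrite | github.com/rickcnagy/QSTools | utility/fill_in_pivot.py | resolve_val
-- ===== SOURCE A (Python) =====
-- def resolve_val(row_index, col, csv):
--     row = csv[row_index]
--     if row[col]:
--         return row[col]
--     elif row_index > 0:
--         return resolve_val(row_index - 1, col, csv)
--     else:
--         return None
-- ===== SOURCE B (Python) =====
-- def resolve_val(row_index, col, csv):
--     i = row_index
--     while not csv[i][col] and i > 0:
--         i -= 1
--     return csv[i][col] or None
-- ===== Notes on version B (the rewrite author's own statement) =====
-- stated objective: idiomatic
-- what changed: Replaces the recursion that decrements row_index with an iterative while-loop that walks an index upward until the column value is truthy or the index is no longer positive, then returns that value or None; Pre_ excludes only inputs where A raises IndexError/KeyError.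
import Mathlib
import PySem

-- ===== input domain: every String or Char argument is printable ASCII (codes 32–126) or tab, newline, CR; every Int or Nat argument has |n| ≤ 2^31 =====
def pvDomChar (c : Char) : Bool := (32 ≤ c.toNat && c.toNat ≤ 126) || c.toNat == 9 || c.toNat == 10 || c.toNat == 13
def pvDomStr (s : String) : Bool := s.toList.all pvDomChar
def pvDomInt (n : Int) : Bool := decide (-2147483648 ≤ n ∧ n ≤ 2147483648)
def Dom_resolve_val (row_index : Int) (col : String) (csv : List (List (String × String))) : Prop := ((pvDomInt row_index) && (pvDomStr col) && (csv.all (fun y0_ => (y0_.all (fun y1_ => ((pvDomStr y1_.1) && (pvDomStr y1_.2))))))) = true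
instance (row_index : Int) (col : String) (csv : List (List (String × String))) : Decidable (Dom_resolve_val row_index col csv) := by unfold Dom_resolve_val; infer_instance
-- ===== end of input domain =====

-- B replaces A's recursion by an iterative while-loop over an index; objective: idiomatic, same cost.

-- ===== PORT A =====
-- A's recursion on row_index; a missing row (IndexError) or key (KeyError) returns none — excluded by Pre_.
def resolve_val (row_index : Int) (col : String) (csv : List (List (String × String))) : Option String :=
  match PySem.List.pyGet? csv row_index with
  | none => none  -- IndexError
  | some row =>
    match (PySem.Dict.ofList row).get? col with
    | none => none  -- KeyError
    | some v =>
      if v ≠ "" then some v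
      else if h : row_index > 0 then resolve_val (row_index - 1) col csv
      else none
termination_by row_index.toNat
decreasing_by omega

-- ===== PORT B =====
-- the while-loop: returns the final value of i (none = IndexError/KeyError during the loop)
def pvLoop (col : String) (csv : List (List (String × String))) (i : Int) : Option Int :=
  match PySem.List.pyGet? csv i with
  | none => none  -- IndexError
  | some row =>
    match (PySem.Dict.ofList row).get? col with
    | none => none  -- KeyError
    | some v =>
      if v = "" then
        if h : i > 0 then pvLoop col csv (i - 1) else some i
      else some i
termination_by i.toNat
decreasing_by omega

-- 'return csv[i][col] or None' after the loop
def resolve_val_alt (row_index : Int) (col : String) (csv : List (List (String × String))) : Option String :=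
  match pvLoop col csv row_index with
  | none => none
  | some i =>
    match PySem.List.pyGet? csv i with
    | none => none
    | some row =>
      match (PySem.Dict.ofList row).get? col with
      | none => none
      | some v => if v = "" then none else some v

-- ===== PRECONDITION & SPEC =====
def pvKeyAt (csv : List (List (String × String))) (col : String) (j : Nat) : Bool :=
  ((PySem.Dict.ofList (csv.getD j [])).get? col).isSome
def pvTruthyAt (csv : List (List (String × String))) (col : String) (j : Nat) : Bool :=
  match (PySem.Dict.ofList (csv.getD j [])).get? col with
  | some v => v != ""
  | none => false

-- Pre_: exactly the inputs on which the Python A returns (no IndexError/KeyError): the start index is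
-- in range, and every row the upward walk reaches before hitting a non-empty value has the column.
def Pre_resolve_val (row_index : Int) (col : String) (csv : List (List (String × String))) : Prop :=
  PySem.Raise.InRange csv.length row_index ∧
  (if row_index < 0 then pvKeyAt csv col ((csv.length : Int) + row_index).toNat = true
   else ∀ j < row_index.toNat + 1, pvKeyAt csv col j = false →
        ∃ k < row_index.toNat + 1, j < k ∧ pvTruthyAt csv col k = true)
instance (row_index : Int) (col : String) (csv : List (List (String × String))) : Decidable (Pre_resolve_val row_index col csv) := by unfold Pre_resolve_val; infer_instance

def pvWitness_resolve_val : Int × String × (List (List (String × String))) :=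
  (1, "a", [[("a", "x")], [("a", "")]])

def Spec_resolve_val (row_index : Int) (col : String) (csv : List (List (String × String))) (out : Option String) : Prop := out = resolve_val_alt row_index col csv
instance (row_index : Int) (col : String) (csv : List (List (String × String))) (out : Option String) : Decidable (Spec_resolve_val row_index col csv out) := by unfold Spec_resolve_val; infer_instance

-- ===== CLAIM (what is proved, stated in full; the proofs are below) =====
def Claim_equal_resolve_val : Prop := ∀ (row_index : Int) (col : String) (csv : List (List (String × String))), Dom_resolve_val row_index col csv → Pre_resolve_val row_index col csv → Spec_resolve_val row_index col csv (resolve_val row_index col csv)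

-- ===== LEMMAS AND PROOFS =====

-- A's recursion equals B's loop-then-read on EVERY input (the equality is unconditional)
theorem pv_eq_all (col : String) (csv : List (List (String × String))) :
    ∀ n : Nat, ∀ i : Int, i.toNat = n → resolve_val i col csv = resolve_val_alt i col csv := by
  intro n
  induction n using Nat.strong_induction_on with
  | _ n ih =>
    intro i hi
    rw [resolve_val, resolve_val_alt, pvLoop]
    cases hg : PySem.List.pyGet? csv i with
    | none => rfl
    | some row =>
      cases hq : (PySem.Dict.ofList row).get? col with
      | none => simp [hq]
      | some v =>
        by_cases hv : v = ""
        · by_cases hpos : i > 0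
          · have := ih (i - 1).toNat (by omega) (i - 1) rfl
            rw [resolve_val_alt] at this
            simpa [hq, hv, hpos] using this
          · simp [hq, hv, hpos, hg]
        · simp [hq, hv, hg]

-- ===== VERDICT (by name: the statement is the Claim_ definition above) =====
theorem resolve_val_spec : Claim_equal_resolve_val := by
  intro row_index col csv _ _
  exact pv_eq_all col csv row_index.toNat row_index rfl
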